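-- pv_equiv track=rewrite | github.com/Wieceslaw/itmo-algorithms-labs | Lab6/3.py | func
-- ===== SOURCE A (Python) =====
-- class ChainSet:
--     def __init__(self, m):
--         self.m = m
--         self.table = [None] * m
--
--     def add(self, value):
--         index = self.hash(value)
--         if self.table[index] is None:
--             self.table[index] = [value]
--             return
--         if value in self.table[index]:
--             return
--         self.table[index].append(value)
--
--     def delete(self, value):
--         index = self.hash(value)
--         if self.table[index] is None:
--             return
--         for i, el in enumerate(self.table[index]):
--             if el == value:
--                 del self.table[index][i]
--                 if len(self.table[index]) == 0:
--                     self.table[index] = None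
--                 break
--
--     def find(self, value):
--         index = self.hash(value)
--         if self.table[index] is None:
--             return False
--         return value in self.table[index]
--
--     def check(self, index):
--         if self.table[index] is None:
--             return ''
--         return self.table[index]
--
--     def hash(self, string):
--         return (sum(ord(el) * (263 ** i) for i, el in enumerate(string)) % 1000000007) % self.m
--
-- def func(m, n, commands):
--     _set = ChainSet(m)
--     result = []
--     for com in commands:
--         if com[0] == 'add':
--             _set.add(com[1])
--         elif com[0] == 'del':
--             _set.delete(com[1])
--         elif com[0] == 'find':
--             if _set.find(com[1]):
--                 result.append('yes')
--             else:
--                 result.append('no')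
--         elif com[0] == 'check':
--             result.append(' '.join(_set.check(int(com[1]))[::-1]))
--     return result
-- ===== SOURCE B (Python) =====
-- def func(m, n, commands):
--     MOD = 1000000007
--
--     def h(s):
--         v = 0
--         for c in reversed(s):
--             v = (v * 263 + ord(c)) % MOD
--         return v % m
--
--     index = {}  # value -> its bucket; dict order doubles as chain order
--     result = []
--     for com in commands:
--         op = com[0]
--         if op == 'add':
--             if com[1] not in index:
--                 index[com[1]] = h(com[1])
--         elif op == 'del':
--             index.pop(com[1], None)
--         elif op == 'find':
--             result.append('yes' if com[1] in index else 'no')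
--         elif op == 'check':
--             bucket = int(com[1]) % m
--             result.append(' '.join(v for v in reversed(index) if index[v] == bucket))
--     return result
-- ===== Notes on version B (the rewrite author's own statement) =====
-- stated objective: alternative
-- what changed: B replaces A's m-slot chained table and per-character bignum-power hash (sum of ord*263**i with a fresh 263**i per position) by a single insertion-ordered dict mapping value -> bucket index, computed with a Horner hash that reduces mod 1000000007 at every step; check normalizes the queried index with % m and scans the dict instead of indexing a table; Pre_ excludes only inputs where A raises (empty command, missing argument, unparseable or out-of-range check index, m < 1 with a table-touching command).
import Mathlib
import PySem

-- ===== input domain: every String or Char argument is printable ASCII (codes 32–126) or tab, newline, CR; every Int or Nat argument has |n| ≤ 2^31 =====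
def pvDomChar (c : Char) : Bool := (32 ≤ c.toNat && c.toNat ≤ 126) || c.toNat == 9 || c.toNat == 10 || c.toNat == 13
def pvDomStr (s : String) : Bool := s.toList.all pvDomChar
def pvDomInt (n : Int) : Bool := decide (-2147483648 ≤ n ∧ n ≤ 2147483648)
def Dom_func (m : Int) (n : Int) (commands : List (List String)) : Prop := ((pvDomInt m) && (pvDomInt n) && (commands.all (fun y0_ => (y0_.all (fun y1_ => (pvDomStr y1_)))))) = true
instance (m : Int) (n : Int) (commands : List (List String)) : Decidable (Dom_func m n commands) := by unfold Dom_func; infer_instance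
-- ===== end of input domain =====

-- B replaces A's m-slot chained hash table by a single insertion-ordered dict (value → bucket
-- index), with a Horner hash reducing mod 1000000007 at each step; return value proved equal.

-- ===== PORT A =====
-- hash(): sum(ord(el) * 263**i for i, el in enumerate(string)) % 1000000007 % m
def hashA (m : Int) (s : String) : Int :=
  PySem.Int.mod (PySem.Int.mod
    ((s.toList.foldl (fun (p : Int × Nat) c => (p.1 + (c.toNat : Int) * 263 ^ p.2, p.2 + 1)) (0, 0)).1)
    1000000007) m

-- the 'for i, el in enumerate(...): if el == value: del ...; break' loop of ChainSet.delete
def removeFirst : List String → String → List String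
  | [], _ => []
  | x :: t, v => if x = v then t else x :: removeFirst t v

-- Python 'self.table[index] = x' (index may be negative; callers have it in range)
def setPy (t : List (Option (List String))) (i : Int) (x : Option (List String)) :
    List (Option (List String)) :=
  t.set (if i < 0 then ((t.length : Int) + i).toNat else i.toNat) x

-- ChainSet.add
def addA (m : Int) (t : List (Option (List String))) (v : String) :
    Option (List (Option (List String))) :=
  match PySem.List.pyGet? t (hashA m v) with
  | none => none
  | some none => some (setPy t (hashA m v) (some [v]))
  | some (some b) => if v ∈ b then some t else some (setPy t (hashA m v) (some (b ++ [v])))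

-- ChainSet.delete
def delA (m : Int) (t : List (Option (List String))) (v : String) :
    Option (List (Option (List String))) :=
  match PySem.List.pyGet? t (hashA m v) with
  | none => none
  | some none => some t
  | some (some b) =>
    if v ∈ b then
      let b' := removeFirst b v
      some (setPy t (hashA m v) (if b' = [] then none else some b'))
    else some t

-- ChainSet.find
def findA (m : Int) (t : List (Option (List String))) (v : String) : Option Bool :=
  match PySem.List.pyGet? t (hashA m v) with
  | none => none
  | some none => some false
  | some (some b) => some (v ∈ b)

-- ChainSet.check; Python returns the bucket list, or '' when empty — the caller only ever
-- reverses and ' '-joins it, and ''[::-1] joins to '' exactly like [], so '' is encoded as []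
def checkA (t : List (Option (List String))) (k : Int) : Option (List String) :=
  match PySem.List.pyGet? t k with
  | none => none
  | some none => some []
  | some (some b) => some b

-- one iteration of the command loop; none = the Python raises
def stepA (m : Int) (st : List (Option (List String)) × List String) (com : List String) :
    Option (List (Option (List String)) × List String) :=
  match com with
  | [] => none
  | op :: _ =>
    if op = "add" then
      match PySem.List.pyGet? com 1 with
      | none => none
      | some v => (addA m st.1 v).map (fun t' => (t', st.2))
    else if op = "del" then
      match PySem.List.pyGet? com 1 with
      | none => none
      | some v => (delA m st.1 v).map (fun t' => (t', st.2))
    else if op = "find" then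
      match PySem.List.pyGet? com 1 with
      | none => none
      | some v =>
        (findA m st.1 v).map (fun r => (st.1, st.2 ++ [if r then "yes" else "no"]))
    else if op = "check" then
      match PySem.List.pyGet? com 1 with
      | none => none
      | some v =>
        match PySem.Int.ofStr? v with
        | none => none
        | some k =>
          -- ' '.join(bucket[::-1]); [::-1] on a list is reversal (exact)
          (checkA st.1 k).map (fun b => (st.1, st.2 ++ [PySem.Str.join " " b.reverse]))
    else some st

def func (m : Int) (n : Int) (commands : List (List String)) : List String :=
  ((commands.foldl (fun acc com => acc.bind (fun st => stepA m st com))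
      (some (List.replicate m.toNat none, ([] : List String)))).map (·.2)).getD []

-- ===== PORT B =====
-- Horner hash, mod applied each step, over reversed(s)
def hashB (m : Int) (s : String) : Int :=
  PySem.Int.mod
    (s.toList.reverse.foldl (fun v c => PySem.Int.mod (v * 263 + (c.toNat : Int)) 1000000007) 0) m

def stepB (m : Int) (st : PySem.Dict String Int × List String) (com : List String) :
    Option (PySem.Dict String Int × List String) :=
  match com with
  | [] => none
  | op :: _ =>
    if op = "add" then
      match PySem.List.pyGet? com 1 with
      | none => none
      | some v =>
        if st.1.contains v then some st else some (st.1.insert v (hashB m v), st.2)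
    else if op = "del" then
      match PySem.List.pyGet? com 1 with
      | none => none
      | some v => some (st.1.erase v, st.2)
    else if op = "find" then
      match PySem.List.pyGet? com 1 with
      | none => none
      | some v => some (st.1, st.2 ++ [if st.1.contains v then "yes" else "no"])
    else if op = "check" then
      match PySem.List.pyGet? com 1 with
      | none => none
      | some v =>
        match PySem.Int.ofStr? v with
        | none => none
        | some k =>
          let i := PySem.Int.mod k m
          -- ' '.join(v for v in reversed(index) if index[v] == bucket)
          some (st.1, st.2 ++
            [PySem.Str.join " " ((st.1.items.reverse.filter (fun p => p.2 == i)).map (·.1))])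
    else some st

def func_alt (m : Int) (n : Int) (commands : List (List String)) : List String :=
  ((commands.foldl (fun acc com => acc.bind (fun st => stepB m st com))
      (some (PySem.Dict.empty, ([] : List String)))).map (·.2)).getD []

-- ===== PRECONDITION & SPEC =====
-- Pre_func excludes exactly the inputs where A raises: a command that is the empty list
-- (com[0]: IndexError); with m < 1 any add/del/find/check command ('% 0' or IndexError on the
-- empty table), so then only unrecognised commands are admitted; with m ≥ 1: add/del/find/check
-- without an argument (com[1]: IndexError), and a 'check' whose argument is not int()-parseable
-- (ValueError) or parses outside [-m, m) (IndexError).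
def preCom (m : Int) (com : List String) : Bool :=
  match com with
  | [] => false
  | op :: rest =>
    if op = "add" ∨ op = "del" ∨ op = "find" then !rest.isEmpty
    else if op = "check" then
      match rest with
      | [] => false
      | v :: _ =>
        match PySem.Int.ofStr? v with
        | some k => decide (-m ≤ k ∧ k < m)
        | none => false
    else true

-- a command A ignores (no table access)
def otherOp (com : List String) : Bool :=
  match com with
  | [] => false
  | op :: _ => !(op = "add" || op = "del" || op = "find" || op = "check")

def Pre_func (m : Int) (n : Int) (commands : List (List String)) : Prop :=
  (1 ≤ m ∧ commands.all (preCom m) = true) ∨ commands.all otherOp = true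
instance (m : Int) (n : Int) (commands : List (List String)) : Decidable (Pre_func m n commands) := by
  unfold Pre_func; infer_instance

def pvWitness_func : Int × Int × List (List String) :=
  (3, 4, [["add", "ab"], ["find", "ab"], ["check", "0"], ["del", "ab"]])

def Spec_func (m : Int) (n : Int) (commands : List (List String)) (out : List String) : Prop := out = func_alt m n commands
instance (m : Int) (n : Int) (commands : List (List String)) (out : List String) : Decidable (Spec_func m n commands out) := by unfold Spec_func; infer_instance

-- ===== CLAIM (what is proved, stated in full; the proofs are below) =====
def Claim_equal_func : Prop := ∀ (m : Int) (n : Int) (commands : List (List String)), Dom_func m n commands → Pre_func m n commands → Spec_func m n commands (func m n commands)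

-- ===== LEMMAS AND PROOFS =====

-- polynomial value Σ ord cᵢ · 263^i
def sVal : List Char → Int
  | [] => 0
  | c :: t => (c.toNat : Int) + 263 * sVal t

lemma pairfold_eq (l : List Char) : ∀ (a : Int) (i : Nat),
    (l.foldl (fun (p : Int × Nat) c => (p.1 + (c.toNat : Int) * 263 ^ p.2, p.2 + 1)) (a, i)).1
      = a + 263 ^ i * sVal l := by
  induction l with
  | nil => intro a i; simp [sVal]
  | cons c t ih =>
    intro a i
    simp only [List.foldl_cons, sVal, ih]
    ring

lemma horner_nomod (l : List Char) : ∀ (v : Int),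
    l.reverse.foldl (fun v c => v * 263 + (c.toNat : Int)) v
      = v * 263 ^ l.length + sVal l := by
  induction l with
  | nil => intro v; simp [sVal]
  | cons c t ih =>
    intro v
    simp only [List.reverse_cons, List.foldl_append, List.foldl_cons, List.foldl_nil, ih,
      sVal, List.length_cons]
    ring

lemma modfold (l : List Char) : ∀ (v : Int),
    l.foldl (fun v c => PySem.Int.mod (v * 263 + (c.toNat : Int)) 1000000007)
        (PySem.Int.mod v 1000000007)
      = PySem.Int.mod (l.foldl (fun v c => v * 263 + (c.toNat : Int)) v) 1000000007 := by
  induction l with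
  | nil => intro v; rfl
  | cons c t ih =>
    intro v
    simp only [List.foldl_cons]
    rw [← ih (v * 263 + c.toNat)]
    congr 1
    rw [PySem.Int.mod_eq_emod_of_pos (by norm_num), PySem.Int.mod_eq_emod_of_pos (by norm_num),
      PySem.Int.mod_eq_emod_of_pos (by norm_num)]
    omega

lemma pvHashEq (m : Int) (s : String) : hashA m s = hashB m s := by
  unfold hashA hashB
  rw [pairfold_eq]
  have h0 : (s.toList.reverse.foldl (fun v c => PySem.Int.mod (v * 263 + (c.toNat : Int)) 1000000007) 0)
      = s.toList.reverse.foldl (fun v c => PySem.Int.mod (v * 263 + (c.toNat : Int)) 1000000007)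
          (PySem.Int.mod 0 1000000007) := by norm_num [PySem.Int.mod]
  rw [h0, modfold, horner_nomod]
  norm_num

lemma hash_nonneg (m : Int) (hm : 1 ≤ m) (s : String) : 0 ≤ hashB m s :=
  PySem.Int.mod_nonneg _ (by omega)

lemma hash_lt (m : Int) (hm : 1 ≤ m) (s : String) : hashB m s < m :=
  PySem.Int.mod_lt _ (by omega)

-- the chain stored in B's dict for bucket i
def bkt (d : PySem.Dict String Int) (i : Int) : List String :=
  (d.items.filter (fun p => p.2 == i)).map (·.1)

def PvInv (m : Int) (t : List (Option (List String))) (d : PySem.Dict String Int) : Prop :=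
  t.length = m.toNat ∧ d.keys.Nodup ∧ (∀ p ∈ d.items, p.2 = hashB m p.1) ∧
  ∀ j : Nat, (hj : j < t.length) →
    t[j] = (if bkt d (j : Int) = [] then none else some (bkt d (j : Int)))


lemma pyGet?_pos {α : Type} (t : List α) (i : Int) (h0 : 0 ≤ i) (h1 : i < (t.length : Int)) :
    PySem.List.pyGet? t i = some (t[i.toNat]'(by omega)) := by
  simp only [PySem.List.pyGet?, PySem.List.pyIdx?, if_pos h0, if_pos h1, Option.bind_some]
  exact List.getElem?_eq_getElem (by omega)

lemma pyGet?_neg {α : Type} (t : List α) (i : Int) (h0 : i < 0) (h1 : -(t.length : Int) ≤ i) :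
    PySem.List.pyGet? t i = some (t[t.length - (-i).toNat]'(by omega)) := by
  simp only [PySem.List.pyGet?, PySem.List.pyIdx?, if_neg (by omega : ¬ 0 ≤ i), if_pos h1,
    Option.bind_some]
  exact List.getElem?_eq_getElem (by omega)

lemma pyGet1 {α : Type} (a b : α) (l : List α) : PySem.List.pyGet? (a :: b :: l) 1 = some b := by
  have : (1 : Int) < ((a :: b :: l).length : Int) := by simp
  rw [pyGet?_pos _ 1 (by omega) this]
  rfl

lemma setPy_nonneg (t : List (Option (List String))) (i : Int) (h0 : 0 ≤ i) (x) :
    setPy t i x = t.set i.toNat x := by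
  simp [setPy, not_lt.mpr h0]

lemma mem_bkt_hash {m : Int} {d : PySem.Dict String Int} {v : String} {i : Int}
    (hh : ∀ p ∈ d.items, p.2 = hashB m p.1) (hv : v ∈ bkt d i) :
    d.contains v = true ∧ i = hashB m v := by
  unfold bkt at hv
  obtain ⟨p, hp, hpv⟩ := List.mem_map.mp hv
  have hpi := List.mem_filter.mp hp
  have h2 : p.2 = i := by simpa using hpi.2
  constructor
  · rw [PySem.Dict.contains_iff_mem_keys]
    exact List.mem_map.mpr ⟨p, hpi.1, hpv⟩
  · rw [← h2, hh p hpi.1, hpv]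

lemma contains_mem_bkt {m : Int} {d : PySem.Dict String Int} {v : String}
    (hh : ∀ p ∈ d.items, p.2 = hashB m p.1) (hc : d.contains v = true) :
    v ∈ bkt d (hashB m v) := by
  rw [PySem.Dict.contains_iff_mem_keys] at hc
  obtain ⟨p, hp, hpv⟩ := List.mem_map.mp hc
  refine List.mem_map.mpr ⟨p, List.mem_filter.mpr ⟨hp, ?_⟩, hpv⟩
  simp [hh p hp, hpv]

lemma not_contains_of_not_mem_bkt {m : Int} {d : PySem.Dict String Int} {v : String}
    (hh : ∀ p ∈ d.items, p.2 = hashB m p.1) (hv : v ∉ bkt d (hashB m v)) :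
    d.contains v = false := by
  by_contra h
  exact hv (contains_mem_bkt hh (by simpa using h))

lemma bkt_insert (d : PySem.Dict String Int) (v : String) (h i : Int)
    (hnc : d.contains v = false) :
    bkt (d.insert v h) i = bkt d i ++ (if h = i then [v] else []) := by
  unfold bkt
  rw [PySem.Dict.items_insert_of_not_contains d h hnc, List.filter_append, List.map_append]
  congr 1
  by_cases hi : h = i <;> simp [hi]

lemma map_fst_filter_comm (v : String) (i : Int) (l : List (String × Int)) :
    ((l.filter (fun p => p.2 == i && !(p.1 == v))).map (·.1))
      = ((l.filter (fun p => p.2 == i)).map (·.1)).filter (fun x => !(x == v)) := by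
  induction l with
  | nil => rfl
  | cons p t ih =>
    by_cases h1 : p.1 = v <;> by_cases h2 : p.2 = i <;>
      simp [List.filter_cons, h1, h2, ih]

lemma bkt_erase (d : PySem.Dict String Int) (v : String) (i : Int) :
    bkt (d.erase v) i = (bkt d i).filter (fun x => !(x == v)) := by
  unfold bkt
  show ((d.items.filter (fun p => !(p.1 == v))).filter (fun p => p.2 == i)).map (·.1) = _
  rw [List.filter_filter, map_fst_filter_comm]

lemma keys_erase_sublist (d : PySem.Dict String Int) (v : String) :
    (d.erase v).keys.Sublist d.keys :=
  List.Sublist.map _ List.filter_sublist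

lemma items_erase_mem {d : PySem.Dict String Int} {v : String} {p : String × Int}
    (hp : p ∈ (d.erase v).items) : p ∈ d.items := by
  have : (d.erase v).items = d.items.filter (fun p => !(p.1 == v)) := rfl
  rw [this] at hp
  exact (List.mem_filter.mp hp).1

lemma erase_of_not_contains (d : PySem.Dict String Int) (v : String)
    (hnc : d.contains v = false) : d.erase v = d := by
  apply PySem.Dict.ext
  show d.items.filter (fun p => !(p.1 == v)) = d.items
  apply List.filter_eq_self.mpr
  intro p hp
  simp only [Bool.not_eq_eq_eq_not, Bool.not_true, beq_eq_false_iff_ne, ne_eq]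
  intro hpv
  rw [← Bool.not_eq_true, PySem.Dict.contains_iff_mem_keys] at hnc
  exact hnc (List.mem_map.mpr ⟨p, hp, hpv⟩)

lemma bkt_nodup {d : PySem.Dict String Int} (hnd : d.keys.Nodup) (i : Int) :
    (bkt d i).Nodup :=
  (List.Sublist.map _ List.filter_sublist).nodup hnd

lemma removeFirst_eq_erase (b : List String) (v : String) : removeFirst b v = b.erase v := by
  induction b with
  | nil => rfl
  | cons x t ih =>
    by_cases h : x = v <;> simp [removeFirst, h, ih]

lemma lookup_bucket (m : Int) {t : List (Option (List String))} {d : PySem.Dict String Int}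
    (hinv : PvInv m t d) (h : Int) (h0 : 0 ≤ h) (h1 : h < m) :
    PySem.List.pyGet? t h = some (if bkt d h = [] then none else some (bkt d h)) := by
  obtain ⟨hlen, -, -, hbuck⟩ := hinv
  have hj : h.toNat < t.length := by omega
  rw [pyGet?_pos t h h0 (by omega)]
  congr 1
  rw [hbuck h.toNat hj, Int.toNat_of_nonneg h0]

lemma lookup_bucket_neg (m : Int) {t : List (Option (List String))} {d : PySem.Dict String Int}
    (hinv : PvInv m t d) (k : Int) (hm : 1 ≤ m) (hneg : k < 0) (hge : -m ≤ k) :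
    PySem.List.pyGet? t k = some (if bkt d (k + m) = [] then none else some (bkt d (k + m))) := by
  obtain ⟨hlen, -, -, hbuck⟩ := hinv
  rw [pyGet?_neg t k hneg (by omega)]
  congr 1
  have hj : t.length - (-k).toNat < t.length := by omega
  rw [hbuck _ hj]
  have hcast : ((t.length - (-k).toNat : Nat) : Int) = k + m := by omega
  rw [hcast]

lemma add_sim (m : Int) (hm : 1 ≤ m) {t : List (Option (List String))}
    {d : PySem.Dict String Int} (hinv : PvInv m t d) (v : String) :
    ∃ t', addA m t v = some t' ∧
      PvInv m t' (if d.contains v then d else d.insert v (hashB m v)) := by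
  obtain ⟨hlen, hnd, hh, hbuck⟩ := hinv
  have h0 := hash_nonneg m hm v
  have h1 := hash_lt m hm v
  have hT := lookup_bucket m ⟨hlen, hnd, hh, hbuck⟩ (hashB m v) h0 h1
  unfold addA
  rw [pvHashEq, hT]
  by_cases hbv : bkt d (hashB m v) = []
  · have hc : d.contains v = false :=
      not_contains_of_not_mem_bkt hh (by rw [hbv]; exact List.not_mem_nil)
    rw [if_pos hbv]
    dsimp only
    simp only [hc, Bool.false_eq_true, if_false]
    refine ⟨_, rfl, ?_, PySem.Dict.nodup_keys_insert d v _ hnd, ?_, ?_⟩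
    · rw [setPy_nonneg _ _ h0, List.length_set]; exact hlen
    · intro p hp
      rw [PySem.Dict.items_insert_of_not_contains d _ hc] at hp
      rcases List.mem_append.mp hp with h' | h'
      · exact hh p h'
      · simp only [List.mem_singleton] at h'
        rw [h']
    · intro j hj
      simp only [setPy_nonneg _ _ h0, List.length_set] at hj ⊢
      rw [bkt_insert d v _ _ hc]
      by_cases hji : j = (hashB m v).toNat
      · subst hji
        rw [List.getElem_set_self (by simpa [List.length_set] using hj),
          Int.toNat_of_nonneg h0, hbv]
        simp
      · rw [List.getElem_set_ne (fun e => hji e.symm)]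
        have hne : ¬ (hashB m v = (j : Int)) := by omega
        rw [if_neg hne, List.append_nil]
        exact hbuck j hj
  · rw [if_neg hbv]
    dsimp only
    by_cases hv : v ∈ bkt d (hashB m v)
    · have hc : d.contains v = true := (mem_bkt_hash hh hv).1
      simp only [hv, if_pos, hc, if_true]
      exact ⟨t, rfl, hlen, hnd, hh, hbuck⟩
    · have hc : d.contains v = false := not_contains_of_not_mem_bkt hh hv
      simp only [hv, if_neg, hc, Bool.false_eq_true, if_false]
      refine ⟨_, rfl, ?_, PySem.Dict.nodup_keys_insert d v _ hnd, ?_, ?_⟩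
      · rw [setPy_nonneg _ _ h0, List.length_set]; exact hlen
      · intro p hp
        rw [PySem.Dict.items_insert_of_not_contains d _ hc] at hp
        rcases List.mem_append.mp hp with h' | h'
        · exact hh p h'
        · simp only [List.mem_singleton] at h'
          rw [h']
      · intro j hj
        simp only [setPy_nonneg _ _ h0, List.length_set] at hj ⊢
        rw [bkt_insert d v _ _ hc]
        by_cases hji : j = (hashB m v).toNat
        · subst hji
          rw [List.getElem_set_self (by simpa [List.length_set] using hj),
            Int.toNat_of_nonneg h0, if_pos rfl]
          simp
        · rw [List.getElem_set_ne (fun e => hji e.symm)]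
          have hne : ¬ (hashB m v = (j : Int)) := by omega
          rw [if_neg hne, List.append_nil]
          exact hbuck j hj

lemma not_mem_bkt_other {m : Int} {d : PySem.Dict String Int} {v : String} {i : Int}
    (hh : ∀ p ∈ d.items, p.2 = hashB m p.1) (hne : i ≠ hashB m v) : v ∉ bkt d i := by
  intro hv
  exact hne (mem_bkt_hash hh hv).2

lemma del_sim (m : Int) (hm : 1 ≤ m) {t : List (Option (List String))}
    {d : PySem.Dict String Int} (hinv : PvInv m t d) (v : String) :
    ∃ t', delA m t v = some t' ∧ PvInv m t' (d.erase v) := by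
  obtain ⟨hlen, hnd, hh, hbuck⟩ := hinv
  have h0 := hash_nonneg m hm v
  have h1 := hash_lt m hm v
  have hT := lookup_bucket m ⟨hlen, hnd, hh, hbuck⟩ (hashB m v) h0 h1
  unfold delA
  rw [pvHashEq, hT]
  by_cases hbv : bkt d (hashB m v) = []
  · have hc : d.contains v = false :=
      not_contains_of_not_mem_bkt hh (by rw [hbv]; exact List.not_mem_nil)
    rw [if_pos hbv]
    dsimp only
    rw [erase_of_not_contains d v hc]
    exact ⟨t, rfl, hlen, hnd, hh, hbuck⟩
  · rw [if_neg hbv]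
    dsimp only
    by_cases hv : v ∈ bkt d (hashB m v)
    · simp only [hv, if_pos]
      have herase : removeFirst (bkt d (hashB m v)) v
          = (bkt d (hashB m v)).filter (fun x => !(x == v)) := by
        rw [removeFirst_eq_erase, (bkt_nodup hnd _).erase_eq_filter]
        rfl
      refine ⟨_, rfl, ?_, (keys_erase_sublist d v).nodup hnd, ?_, ?_⟩
      · rw [setPy_nonneg _ _ h0, List.length_set]; exact hlen
      · intro p hp
        exact hh p (items_erase_mem hp)
      · intro j hj
        simp only [setPy_nonneg _ _ h0, List.length_set] at hj ⊢
        rw [bkt_erase d v _]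
        by_cases hji : j = (hashB m v).toNat
        · subst hji
          rw [List.getElem_set_self (by simpa [List.length_set] using hj),
            Int.toNat_of_nonneg h0, herase]
        · rw [List.getElem_set_ne (fun e => hji e.symm)]
          have hne : (j : Int) ≠ hashB m v := by omega
          have hout : v ∉ bkt d (j : Int) := not_mem_bkt_other hh hne
          have hfeq : (bkt d (j : Int)).filter (fun x => !(x == v)) = bkt d (j : Int) := by
            apply List.filter_eq_self.mpr
            intro x hx
            simp only [Bool.not_eq_eq_eq_not, Bool.not_true, beq_eq_false_iff_ne, ne_eq]
            intro hxv
            exact hout (hxv ▸ hx)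
          rw [hfeq]
          exact hbuck j hj
    · simp only [hv, if_false]
      have hc : d.contains v = false := not_contains_of_not_mem_bkt hh hv
      rw [erase_of_not_contains d v hc]
      exact ⟨t, rfl, hlen, hnd, hh, hbuck⟩

lemma find_sim (m : Int) (hm : 1 ≤ m) {t : List (Option (List String))}
    {d : PySem.Dict String Int} (hinv : PvInv m t d) (v : String) :
    findA m t v = some (d.contains v) := by
  obtain ⟨hlen, hnd, hh, hbuck⟩ := hinv
  have h0 := hash_nonneg m hm v
  have h1 := hash_lt m hm v
  have hT := lookup_bucket m ⟨hlen, hnd, hh, hbuck⟩ (hashB m v) h0 h1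
  unfold findA
  rw [pvHashEq, hT]
  by_cases hbv : bkt d (hashB m v) = []
  · have hc : d.contains v = false :=
      not_contains_of_not_mem_bkt hh (by rw [hbv]; exact List.not_mem_nil)
    rw [if_pos hbv, hc]
  · rw [if_neg hbv]
    dsimp only
    by_cases hv : v ∈ bkt d (hashB m v)
    · rw [(mem_bkt_hash hh hv).1]
      simp [hv]
    · rw [not_contains_of_not_mem_bkt hh hv]
      simp [hv]

lemma check_sim (m : Int) (hm : 1 ≤ m) {t : List (Option (List String))}
    {d : PySem.Dict String Int} (hinv : PvInv m t d) (k : Int)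
    (hk0 : -m ≤ k) (hk1 : k < m) :
    checkA t k = some (bkt d (PySem.Int.mod k m)) := by
  have hmod : PySem.Int.mod k m = if k < 0 then k + m else k := by
    rw [PySem.Int.mod_eq_emod_of_pos (by omega)]
    by_cases hneg : k < 0
    · rw [if_pos hneg]
      have h1 : (k + m) % m = k + m := Int.emod_eq_of_lt (by omega) (by omega)
      have h2 : (k + m) % m = k % m := by
        have h3 := Int.add_mul_emod_self_left (a := k) (b := m) (c := 1)
        simpa using h3
      rw [← h2, h1]
    · rw [if_neg hneg]
      exact Int.emod_eq_of_lt (by omega) (by omega)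
  rw [hmod]
  unfold checkA
  by_cases hneg : k < 0
  · rw [lookup_bucket_neg m hinv k hm hneg hk0, if_pos hneg]
    by_cases hbv : bkt d (k + m) = []
    · rw [if_pos hbv, hbv]
    · rw [if_neg hbv]
  · rw [lookup_bucket m hinv k (by omega) hk1, if_neg hneg]
    by_cases hbv : bkt d k = []
    · rw [if_pos hbv, hbv]
    · rw [if_neg hbv]

lemma step_sim (m : Int) (hm : 1 ≤ m) (com : List String) (hc : preCom m com = true)
    (t : List (Option (List String))) (d : PySem.Dict String Int) (res : List String)
    (hinv : PvInv m t d) :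
    ∃ t' d' out, stepA m (t, res) com = some (t', res ++ out) ∧
      stepB m (d, res) com = some (d', res ++ out) ∧ PvInv m t' d' := by
  cases com with
  | nil => simp [preCom] at hc
  | cons op rest =>
    by_cases ha : op = "add"
    · subst ha
      cases rest with
      | nil => simp [preCom] at hc
      | cons v r =>
        obtain ⟨t', hA, hinv'⟩ := add_sim m hm hinv v
        refine ⟨t', if d.contains v then d else d.insert v (hashB m v), [], ?_, ?_, hinv'⟩
        · simp [stepA, pyGet1, hA]
        · by_cases hcv : d.contains v <;> simp [stepB, pyGet1, hcv]
    · by_cases hd : op = "del"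
      · subst hd
        cases rest with
        | nil => simp [preCom] at hc
        | cons v r =>
          obtain ⟨t', hA, hinv'⟩ := del_sim m hm hinv v
          refine ⟨t', d.erase v, [], ?_, ?_, hinv'⟩
          · simp [stepA, pyGet1, hA]
          · simp [stepB, pyGet1]
      · by_cases hf : op = "find"
        · subst hf
          cases rest with
          | nil => simp [preCom] at hc
          | cons v r =>
            refine ⟨t, d, [if d.contains v then "yes" else "no"], ?_, ?_, hinv⟩
            · simp [stepA, pyGet1, find_sim m hm hinv v]
            · simp [stepB, pyGet1]
        · by_cases hch : op = "check"
          · subst hch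
            cases rest with
            | nil => simp [preCom] at hc
            | cons v r =>
              simp only [preCom] at hc
              rw [if_neg (by simp), if_pos (by simp)] at hc
              cases hp : PySem.Int.ofStr? v with
              | none => rw [hp] at hc; simp at hc
              | some k =>
                rw [hp] at hc
                simp only [decide_eq_true_eq] at hc
                refine ⟨t, d,
                  [PySem.Str.join " " (bkt d (PySem.Int.mod k m)).reverse],
                  ?_, ?_, hinv⟩
                · simp [stepA, pyGet1, hp, check_sim m hm hinv k hc.1 hc.2]
                · simp [stepB, pyGet1, hp, bkt]
          · refine ⟨t, d, [], ?_, ?_, hinv⟩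
            · simp [stepA, ha, hd, hf, hch]
            · simp [stepB, ha, hd, hf, hch]

lemma fold_sim (m : Int) (hm : 1 ≤ m) :
    ∀ (cs : List (List String)) (t : List (Option (List String)))
      (d : PySem.Dict String Int) (res : List String),
      cs.all (preCom m) = true → PvInv m t d →
      ((cs.foldl (fun acc com => acc.bind (fun st => stepA m st com)) (some (t, res))).map (·.2))
        = ((cs.foldl (fun acc com => acc.bind (fun st => stepB m st com)) (some (d, res))).map (·.2)) := by
  intro cs
  induction cs with
  | nil => intro t d res _ _; rfl
  | cons com cs ih =>
    intro t d res hall hinv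
    simp only [List.all_cons, Bool.and_eq_true] at hall
    obtain ⟨t', d', out, hA, hB, hinv'⟩ := step_sim m hm com hall.1 t d res hinv
    simp only [List.foldl_cons, Option.bind_some, hA, hB]
    exact ih t' d' (res ++ out) hall.2 hinv'

lemma inv_init (m : Int) (hm : 1 ≤ m) : PvInv m (List.replicate m.toNat none) PySem.Dict.empty := by
  refine ⟨by simp, PySem.Dict.nodup_keys_empty, ?_, ?_⟩
  · intro p hp; simp [PySem.Dict.empty] at hp
  · intro j hj
    have : bkt PySem.Dict.empty (j : Int) = [] := rfl
    simp [this, List.getElem_replicate]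

lemma stepA_other (m : Int) (st : List (Option (List String)) × List String)
    (com : List String) (h : otherOp com = true) : stepA m st com = some st := by
  cases com with
  | nil => simp [otherOp] at h
  | cons op rest =>
    simp only [otherOp, Bool.not_eq_eq_eq_not, Bool.not_true, Bool.or_eq_false_iff,
      decide_eq_false_iff_not] at h
    simp [stepA, h.1.1.1, h.1.1.2, h.1.2, h.2]

lemma stepB_other (m : Int) (st : PySem.Dict String Int × List String)
    (com : List String) (h : otherOp com = true) : stepB m st com = some st := by
  cases com with
  | nil => simp [otherOp] at h
  | cons op rest =>
    simp only [otherOp, Bool.not_eq_eq_eq_not, Bool.not_true, Bool.or_eq_false_iff,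
      decide_eq_false_iff_not] at h
    simp [stepB, h.1.1.1, h.1.1.2, h.1.2, h.2]

lemma fold_other {σ : Type} (step : σ → List String → Option σ)
    (hstep : ∀ st com, otherOp com = true → step st com = some st) :
    ∀ (cs : List (List String)) (st : σ), cs.all otherOp = true →
      cs.foldl (fun acc com => acc.bind (fun s => step s com)) (some st) = some st := by
  intro cs
  induction cs with
  | nil => intro st _; rfl
  | cons com cs ih =>
    intro st hall
    simp only [List.all_cons, Bool.and_eq_true] at hall
    simp only [List.foldl_cons, Option.bind_some, hstep st com hall.1]
    exact ih st hall.2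

-- ===== VERDICT (by name: the statement is the Claim_ definition above) =====
theorem func_spec : Claim_equal_func := by
  intro m n commands _ hpre
  unfold Spec_func func func_alt
  rcases hpre with ⟨hm, hall⟩ | hother
  · rw [fold_sim m hm commands _ _ _ hall (inv_init m hm)]
  · rw [fold_other (stepA m) (stepA_other m) commands _ hother,
      fold_other (stepB m) (stepB_other m) commands _ hother]
    rfl
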